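-- pv_equiv track=rewrite | github.com/azqbozi/write-sql | convert_cdap_v2.py | find_partition_field
-- ===== SOURCE A (Python) =====
-- def find_partition_field(rows):
--     """查找分区字段 - 检查所有单元格，优先 par_month_id"""
--     partition_candidates = []
--
--     for row in rows[2:]:  # 跳过表名行和表头行
--         for cell in row:
--             if cell and 'par_month' in str(cell).lower():
--                 partition_candidates.append(str(cell))
--
--     # 优先返回 par_month_id
--     for p in partition_candidates:
--         if p == 'par_month_id':
--             return p
--
--     return partition_candidates[0] if partition_candidates else ''
-- ===== SOURCE B (Python) =====
-- def find_partition_field(rows):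
--     """Single pass: return 'par_month_id' immediately; else remember first candidate."""
--     fallback = None
--     for row in rows[2:]:
--         for cell in row:
--             if cell and 'par_month' in str(cell).lower():
--                 s = str(cell)
--                 if s == 'par_month_id':
--                     return s
--                 if fallback is None:
--                     fallback = s
--     return fallback if fallback is not None else ''
-- ===== Notes on version B (the rewrite author's own statement) =====
-- stated objective: simpler
-- what changed: Replaced A's two-pass collect-all-candidates-then-rescan structure with a single traversal that returns 'par_month_id' immediately on sight and otherwise remembers only the first-seen candidate as fallback.
import Mathlib
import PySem

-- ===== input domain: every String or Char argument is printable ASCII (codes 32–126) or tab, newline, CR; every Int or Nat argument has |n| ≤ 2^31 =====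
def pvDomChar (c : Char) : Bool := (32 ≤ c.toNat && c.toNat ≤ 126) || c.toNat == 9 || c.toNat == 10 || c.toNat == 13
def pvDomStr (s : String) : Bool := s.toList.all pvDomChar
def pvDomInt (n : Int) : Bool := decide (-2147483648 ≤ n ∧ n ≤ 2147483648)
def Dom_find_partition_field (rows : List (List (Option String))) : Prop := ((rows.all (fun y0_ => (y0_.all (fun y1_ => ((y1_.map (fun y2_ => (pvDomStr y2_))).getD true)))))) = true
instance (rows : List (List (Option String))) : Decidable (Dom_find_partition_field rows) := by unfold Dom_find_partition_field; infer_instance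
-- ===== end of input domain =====

-- B is a single pass with early exit instead of A's collect-all-then-rescan; objective: simpler (one traversal, no candidate list).

-- ===== PORT A =====
-- the guard `cell and 'par_month' in str(cell).lower()` (shared syntax of both Pythons)
def pvGuard (cell : Option String) : Bool :=
  match cell with
  | none => false
  | some s => (s != "") && PySem.Str.isIn "par_month" (PySem.Str.lower s)

-- `for p in partition_candidates: if p == 'par_month_id': return p`
def pvFindPid : List String → Option String
  | [] => none
  | p :: ps => if p = "par_month_id" then some p else pvFindPid ps

def find_partition_field (rows : List (List (Option String))) : String :=
  let cands :=
    (PySem.List.slice rows (some 2) none).foldl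
      (fun acc row =>
        row.foldl
          (fun acc cell =>
            if pvGuard cell then acc ++ [cell.getD ""] else acc) acc)
      []
  match pvFindPid cands with
  | some p => p
  | none => match cands with
            | c :: _ => c
            | [] => ""

-- ===== PORT B =====
-- inner loop over a row: early return (.inr answer) or the updated fallback (.inl)
def pvScanRow : List (Option String) → Option String → (Option String) ⊕ String
  | [], fb => Sum.inl fb
  | cell :: cs, fb =>
    if pvGuard cell then
      let s := cell.getD ""
      if s = "par_month_id" then Sum.inr s
      else pvScanRow cs (if fb.isNone then some s else fb)
    else pvScanRow cs fb

def pvGo : List (List (Option String)) → Option String → String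
  | [], fb => fb.getD ""
  | row :: rest, fb =>
    match pvScanRow row fb with
    | Sum.inr ans => ans
    | Sum.inl fb' => pvGo rest fb'

def find_partition_field_alt (rows : List (List (Option String))) : String :=
  pvGo (PySem.List.slice rows (some 2) none) none

-- ===== PRECONDITION & SPEC =====
def Spec_find_partition_field (rows : List (List (Option String))) (out : String) : Prop := out = find_partition_field_alt rows
instance (rows : List (List (Option String))) (out : String) : Decidable (Spec_find_partition_field rows out) := by unfold Spec_find_partition_field; infer_instance

-- ===== CLAIM (what is proved, stated in full; the proofs are below) =====
def Claim_equal_find_partition_field : Prop := ∀ (rows : List (List (Option String))), Dom_find_partition_field rows → Spec_find_partition_field rows (find_partition_field rows)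

-- ===== LEMMAS AND PROOFS =====

-- candidates of one row / of all rows, as a reference characterisation
def candRow (row : List (Option String)) : List String :=
  row.filterMap (fun cell => if pvGuard cell then some (cell.getD "") else none)

def candAll (rows : List (List (Option String))) : List String :=
  (rows.map candRow).flatten

def pid : String := "par_month_id"

def spec (l : List String) : String :=
  if l.contains pid then pid else l.headD ""

-- A's inner foldl accumulates candRow
theorem foldl_row (row : List (Option String)) (acc : List String) :
    row.foldl (fun acc cell => if pvGuard cell then acc ++ [cell.getD ""] else acc) acc
      = acc ++ candRow row := by
  induction row generalizing acc with
  | nil => simp [candRow]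
  | cons c cs ih =>
    simp only [List.foldl, candRow, List.filterMap]
    by_cases h : pvGuard c
    · simp [h, ih, candRow]
    · simp [h, ih, candRow]

theorem foldl_rows (rows : List (List (Option String))) (acc : List String) :
    rows.foldl (fun acc row =>
        row.foldl (fun acc cell => if pvGuard cell then acc ++ [cell.getD ""] else acc) acc) acc
      = acc ++ candAll rows := by
  induction rows generalizing acc with
  | nil => simp [candAll]
  | cons r rs ih => simp [List.foldl, foldl_row, candAll]

theorem findPid_eq (l : List String) :
    pvFindPid l = if l.contains pid then some pid else none := by
  induction l with
  | nil => simp [pvFindPid]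
  | cons p ps ih =>
    by_cases h : p = "par_month_id"
    · subst h; simp [pvFindPid, pid]
    · simp only [pvFindPid, if_neg h, ih, pid, List.contains_cons]
      simp [Ne.symm h]

-- A equals spec of the candidate list
theorem A_eq_spec (rows : List (List (Option String))) :
    find_partition_field rows = spec (candAll (PySem.List.slice rows (some 2) none)) := by
  simp only [find_partition_field, foldl_rows, findPid_eq, List.nil_append, spec, pid]
  by_cases h : "par_month_id" ∈ candAll (PySem.List.slice rows (some 2) none)
  · simp [h]
  · simp only [List.contains_iff_mem, h, decide_false, Bool.false_eq_true, if_false, reduceIte]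
    cases candAll (PySem.List.slice rows (some 2) none) <;> simp

-- B's row scan characterised (fb never holds pid)
theorem scanRow_eq (cs : List (Option String)) (fb : Option String) (hfb : fb ≠ some pid) :
    pvScanRow cs fb =
      if (candRow cs).contains pid then Sum.inr pid
      else Sum.inl ((fb.toList ++ candRow cs).head?) := by
  induction cs generalizing fb with
  | nil =>
    simp only [pvScanRow, candRow, List.filterMap_nil, List.contains_nil, Bool.false_eq_true,
      if_false, List.append_nil]
    cases fb <;> simp
  | cons c cs ih =>
    by_cases h : pvGuard c
    · by_cases hp : c.getD "" = pid
      · simp [pvScanRow, h, hp, candRow, pid]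
      · have hp2 : ¬ c.getD "" = "par_month_id" := by simpa [pid] using hp
        have hp3 : ¬ pid = c.getD "" := fun e => hp (Eq.symm e)
        have hfb' : (if fb.isNone then some (c.getD "") else fb) ≠ some pid := by
          cases fb with
          | none => simpa using hp
          | some v => simpa using hfb
        rw [show pvScanRow (c :: cs) fb
              = pvScanRow cs (if fb.isNone then some (c.getD "") else fb) by
            simp [pvScanRow, h, hp2]]
        rw [ih _ hfb']
        have hc : candRow (c :: cs) = c.getD "" :: candRow cs := by simp [candRow, h]
        rw [hc]
        cases fb with
        | none => simp [hp3]
        | some v => simp [hp3]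
    · have hc : candRow (c :: cs) = candRow cs := by simp [candRow, h]
      rw [show pvScanRow (c :: cs) fb = pvScanRow cs fb by simp [pvScanRow, h], ih _ hfb, hc]

-- dropping all but the head of a pid-free prefix does not change spec
theorem spec_head (l m : List String) (hl : l.contains pid = false) :
    spec (l.head?.toList ++ m) = spec (l ++ m) := by
  cases l with
  | nil => simp
  | cons x xs =>
    have hx : x ≠ pid := by simp [List.contains_cons] at hl; exact fun e => hl.1 (Eq.symm e)
    have hxs : xs.contains pid = false := by simp [List.contains_cons] at hl; simpa using hl.2
    have hx' : ¬ pid = x := fun e => hx (Eq.symm e)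
    have hxs' : pid ∉ xs := by simpa using hxs
    simp [spec, hx', hxs']

theorem go_eq (rows : List (List (Option String))) (fb : Option String) (hfb : fb ≠ some pid) :
    pvGo rows fb = spec (fb.toList ++ candAll rows) := by
  induction rows generalizing fb with
  | nil =>
    cases fb with
    | none => simp [pvGo, spec, candAll]
    | some v =>
      have hv2 : ¬ pid = v := fun e => hfb (by rw [e])
      simp [pvGo, spec, candAll, hv2]
  | cons r rs ih =>
    have hcand : candAll (r :: rs) = candRow r ++ candAll rs := by simp [candAll]
    rw [show pvGo (r :: rs) fb
          = (match pvScanRow r fb with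
             | Sum.inr ans => ans
             | Sum.inl fb' => pvGo rs fb') from rfl,
        scanRow_eq r fb hfb, hcand]
    by_cases h : (candRow r).contains pid
    · have hm : pid ∈ candRow r := by simpa using h
      simp [h, spec, hm]
    · have hr : pid ∉ candRow r := by simpa using h
      have hfree : (fb.toList ++ candRow r).contains pid = false := by
        cases fb with
        | none => simpa using hr
        | some v =>
          have hv2 : ¬ pid = v := fun e => hfb (by rw [e])
          simp [hv2, hr]
      have hnm : pid ∉ fb.toList ++ candRow r := by simpa using hfree
      have hfb' : (fb.toList ++ candRow r).head? ≠ some pid := by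
        intro he
        obtain ⟨t, ht⟩ := List.head?_eq_some_iff.mp he
        exact hnm (by simp [ht])
      simp only [h, Bool.false_eq_true, if_false]
      rw [ih _ hfb', spec_head _ _ hfree, List.append_assoc]

-- ===== VERDICT (by name: the statement is the Claim_ definition above) =====
theorem find_partition_field_spec : Claim_equal_find_partition_field := by
  intro rows _
  unfold Spec_find_partition_field find_partition_field_alt
  rw [A_eq_spec, go_eq _ none (by simp)]
  simp
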